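-- pv_equiv track=rewrite | github.com/nkuers/recommendation_system | preprocess/base.py | slice_sequence_fixed_window
-- ===== SOURCE A (Python) =====
-- from typing import List, Dict, Tuple, Optional
--
-- def slice_sequence_fixed_window(
--     seq: List[int],
--     delta_t_seq: List[int],
--     window_size: int = 10
-- ) -> List[Tuple[List[int], List[int]]]:
--     """
--     将 seq 和 delta_t_seq 按固定窗口切片
--     注意：最后一个窗口可能不足 window_size（保留）
--     """
--     assert len(seq) == len(delta_t_seq), "seq and delta_t_seq must have same length"
--
--     slices: List[Tuple[List[int], List[int]]] = []
--     for start in range(0, len(seq), window_size):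
--         end = start + window_size
--         slices.append((seq[start:end], delta_t_seq[start:end]))
--     return slices
-- ===== SOURCE B (Python) =====
-- from typing import List, Tuple
--
-- def slice_sequence_fixed_window(
--     seq: List[int],
--     delta_t_seq: List[int],
--     window_size: int = 10
-- ) -> List[Tuple[List[int], List[int]]]:
--     assert len(seq) == len(delta_t_seq), "seq and delta_t_seq must have same length"
--
--     slices: List[Tuple[List[int], List[int]]] = []
--     cur_seq: List[int] = []
--     cur_dt: List[int] = []
--     for x, d in zip(seq, delta_t_seq):
--         cur_seq.append(x)
--         cur_dt.append(d)
--         if len(cur_seq) == window_size: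
--             slices.append((cur_seq, cur_dt))
--             cur_seq, cur_dt = [], []
--     if cur_seq:
--         slices.append((cur_seq, cur_dt))
--     return slices
-- ===== Notes on version B (the rewrite author's own statement) =====
-- stated objective: alternative
-- what changed: Replaced the loop over start indices with per-index slicing by a single pass over zip(seq, delta_t_seq) that fills two buffers and flushes them into the result each time they reach window_size, with a final flush of the trailing partial window.
-- outside the precondition, e.g. on slice_sequence_fixed_window([1, 2], [3, 4], -1): A returns [], B returns [([1, 2], [3, 4])]
import Mathlib
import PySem

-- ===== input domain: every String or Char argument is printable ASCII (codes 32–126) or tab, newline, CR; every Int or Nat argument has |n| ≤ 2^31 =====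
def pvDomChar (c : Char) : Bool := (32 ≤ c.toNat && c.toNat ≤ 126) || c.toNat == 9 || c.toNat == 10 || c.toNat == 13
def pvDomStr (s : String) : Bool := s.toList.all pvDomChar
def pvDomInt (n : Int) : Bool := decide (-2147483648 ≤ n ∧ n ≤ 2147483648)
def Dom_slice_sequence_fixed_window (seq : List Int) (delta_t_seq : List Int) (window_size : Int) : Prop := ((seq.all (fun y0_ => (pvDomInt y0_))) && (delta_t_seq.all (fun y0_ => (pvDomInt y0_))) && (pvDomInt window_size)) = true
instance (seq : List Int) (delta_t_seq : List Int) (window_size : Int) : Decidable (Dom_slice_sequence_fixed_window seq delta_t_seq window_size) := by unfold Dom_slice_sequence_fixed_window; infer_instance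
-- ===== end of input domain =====

-- B replaces A's loop over start indices with slicing by one pass over the zipped lists
-- filling two buffers that are flushed at window_size (objective: alternative decomposition).


-- ===== PORT A =====
-- for start in range(0, len(seq), window_size): slices.append((seq[start:end], delta_t_seq[start:end]))
def slice_sequence_fixed_window (seq : List Int) (delta_t_seq : List Int) (window_size : Int) : List (List Int × List Int) :=
  (PySem.List.pyRange 0 (PySem.List.len seq) window_size).foldl
    (fun slices start =>
      slices ++ [(PySem.List.slice seq (some start) (some (start + window_size)),
                  PySem.List.slice delta_t_seq (some start) (some (start + window_size)))])
    []

-- ===== PORT B =====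
-- one pass over zip(seq, delta_t_seq); state = (slices, cur_seq, cur_dt); flush at window_size
def pvStepB (window_size : Int)
    (st : List (List Int × List Int) × List Int × List Int) (xd : Int × Int) :
    List (List Int × List Int) × List Int × List Int :=
  let cur_seq := st.2.1 ++ [xd.1]
  let cur_dt := st.2.2 ++ [xd.2]
  if (PySem.List.len cur_seq) = window_size then (st.1 ++ [(cur_seq, cur_dt)], [], [])
  else (st.1, cur_seq, cur_dt)

def slice_sequence_fixed_window_alt (seq : List Int) (delta_t_seq : List Int) (window_size : Int) : List (List Int × List Int) :=
  let st := (seq.zip delta_t_seq).foldl (pvStepB window_size) ([], [], [])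
  if st.2.1 ≠ [] then st.1 ++ [(st.2.1, st.2.2)] else st.1

-- ===== PRECONDITION & SPEC =====
-- Pre_ excludes (a) unequal lengths, where A's assert raises AssertionError, and
-- (b) non-positive window_size, outside the natural domain of a window slicer: at 0 A raises
-- ValueError from range(), and for negative window_size A's empty result is an artefact of the
-- empty range over a negative step, while B returns the whole input as one partial window.
def Pre_slice_sequence_fixed_window (seq : List Int) (delta_t_seq : List Int) (window_size : Int) : Prop :=
  seq.length = delta_t_seq.length ∧ 1 ≤ window_size
instance (seq : List Int) (delta_t_seq : List Int) (window_size : Int) : Decidable (Pre_slice_sequence_fixed_window seq delta_t_seq window_size) := by unfold Pre_slice_sequence_fixed_window; infer_instance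

def pvWitness_slice_sequence_fixed_window : List Int × List Int × Int := ([1, 2, 3, 4, 5], [9, 8, 7, 6, 5], 2)

def Spec_slice_sequence_fixed_window (seq : List Int) (delta_t_seq : List Int) (window_size : Int) (out : List (List Int × List Int)) : Prop := out = slice_sequence_fixed_window_alt seq delta_t_seq window_size
instance (seq : List Int) (delta_t_seq : List Int) (window_size : Int) (out : List (List Int × List Int)) : Decidable (Spec_slice_sequence_fixed_window seq delta_t_seq window_size out) := by unfold Spec_slice_sequence_fixed_window; infer_instance

-- ===== CLAIM (what is proved, stated in full; the proofs are below) =====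
def Claim_equal_slice_sequence_fixed_window : Prop := ∀ (seq : List Int) (delta_t_seq : List Int) (window_size : Int), Dom_slice_sequence_fixed_window seq delta_t_seq window_size → Pre_slice_sequence_fixed_window seq delta_t_seq window_size → Spec_slice_sequence_fixed_window seq delta_t_seq window_size (slice_sequence_fixed_window seq delta_t_seq window_size)

-- ===== LEMMAS AND PROOFS =====

-- range(0, n, w) for 0 < w, 0 < n starts at 0 and the rest is the shifted range over n - w
lemma pyRange_pos_cons (n w : Int) (hw : 0 < w) (hn : 0 < n) :
    PySem.List.pyRange 0 n w = 0 :: (PySem.List.pyRange 0 (n - w) w).map (· + w) := by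
  rw [PySem.List.pyRange_of_pos 0 n hw, PySem.List.pyRange_of_pos 0 (n - w) hw]
  have h1 : ((n - 0 + w - 1) / w).toNat = ((n - 1) / w).toNat + 1 := by
    have : n - 0 + w - 1 = (n - 1) + 1 * w := by ring
    rw [this, Int.add_mul_ediv_right _ _ (by omega : w ≠ 0)]
    have h0 : 0 ≤ (n - 1) / w := Int.ediv_nonneg (by omega) (by omega)
    omega
  by_cases hnw : 0 < n - w
  · have h2 : ((n - w - 0 + w - 1) / w).toNat = ((n - 1) / w).toNat := by
      congr 1; congr 1; omega
    simp only [if_pos hn, if_pos hnw, h1, h2, List.range_succ_eq_map, List.map_cons, List.map_map]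
    congr 1
    · ring
    · apply List.map_congr_left; intro k _; simp [Function.comp]; ring
  · have h2 : (n - 1) / w = 0 := Int.ediv_eq_zero_of_lt (by omega) (by omega)
    simp only [if_pos hn, if_neg hnw, h1, h2]
    simp

-- A as a map, then the peel-one-window unfolding
lemma A_eq_map (seq delta_t_seq : List Int) (w : Int) :
    slice_sequence_fixed_window seq delta_t_seq w =
      (PySem.List.pyRange 0 (PySem.List.len seq) w).map
        (fun start => (PySem.List.slice seq (some start) (some (start + w)),
                       PySem.List.slice delta_t_seq (some start) (some (start + w)))) := by
  unfold slice_sequence_fixed_window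
  rw [PySem.List.foldl_append_singleton_eq_map]
  simp

lemma A_nil (delta_t_seq : List Int) (w : Int) :
    slice_sequence_fixed_window [] delta_t_seq w = [] := by
  rw [A_eq_map]; simp [PySem.List.pyRange]

lemma A_cons (seq delta_t_seq : List Int) (w : Int) (hw : 0 < w) (hs : seq ≠ []) :
    slice_sequence_fixed_window seq delta_t_seq w =
      (seq.take w.toNat, delta_t_seq.take w.toNat) ::
        slice_sequence_fixed_window (seq.drop w.toNat) (delta_t_seq.drop w.toNat) w := by
  have hn : 0 < (PySem.List.len seq) := by
    simp [PySem.List.len_eq]; exact List.length_pos_iff.mpr hs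
  rw [A_eq_map, pyRange_pos_cons _ _ hw hn, List.map_cons, List.map_map, A_eq_map]
  congr 1
  · simp only [zero_add]
    rw [PySem.List.slice_zero_start, PySem.List.slice_zero_start,
        PySem.List.slice_to _ (le_of_lt hw), PySem.List.slice_to _ (le_of_lt hw)]
  · by_cases hnw : 0 < PySem.List.len seq - w
    · have hlen : (PySem.List.len (seq.drop w.toNat)) = PySem.List.len seq - w := by
        simp [PySem.List.len_eq] at *; omega
      rw [hlen]
      apply List.map_congr_left
      intro s hs'
      have hs0 : 0 ≤ s := by
        rw [PySem.List.pyRange_of_pos 0 _ hw] at hs'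
        simp only [List.mem_map] at hs'
        obtain ⟨k, _, hk⟩ := hs'
        have : (0:Int) ≤ w * k := by positivity
        omega
      simp only [Function.comp]
      have r1 := PySem.List.slice_toNat seq (a := s + w) (b := s + w + w) (by omega) (by omega)
      have r2 := PySem.List.slice_toNat delta_t_seq (a := s + w) (b := s + w + w) (by omega) (by omega)
      have r3 := PySem.List.slice_toNat (seq.drop w.toNat) (a := s) (b := s + w) hs0 (by omega)
      have r4 := PySem.List.slice_toNat (delta_t_seq.drop w.toNat) (a := s) (b := s + w) hs0 (by omega)
      rw [r1, r2, r3, r4]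
      rw [List.drop_drop, List.drop_drop]
      have e1 : (s + w + w).toNat - (s + w).toNat = (s + w).toNat - s.toNat := by omega
      have e2 : (s + w).toNat = s.toNat + w.toNat := by omega
      rw [e1, e2, Nat.add_comm w.toNat s.toNat]
    · have h1 : PySem.List.pyRange 0 (PySem.List.len seq - w) w = [] := by
        rw [PySem.List.pyRange_of_pos _ _ hw, if_neg hnw]; simp
      have h2 : PySem.List.pyRange 0 (PySem.List.len (seq.drop w.toNat)) w = [] := by
        rw [PySem.List.pyRange_of_pos _ _ hw]
        have : PySem.List.len (seq.drop w.toNat) = 0 := by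
          simp [PySem.List.len_eq] at *; omega
        rw [this]; simp
      rw [h1, h2]; simp

-- B's state accumulates slices append-only
lemma B_acc_out (w : Int) (pairs : List (Int × Int)) :
    ∀ (init s : List (List Int × List Int)) (cs cd : List Int),
      pairs.foldl (pvStepB w) (init ++ s, cs, cd) =
        ((init ++ (pairs.foldl (pvStepB w) (s, cs, cd)).1),
          (pairs.foldl (pvStepB w) (s, cs, cd)).2) := by
  induction pairs with
  | nil => intro init s cs cd; simp
  | cons p rest ih =>
    intro init s cs cd
    simp only [List.foldl_cons, pvStepB]
    by_cases h : (PySem.List.len (cs ++ [p.1])) = w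
    · simp only [if_pos h, List.append_assoc]; exact ih init _ [] []
    · simp only [if_neg h]; exact ih init s _ _

-- filling the buffers with exactly the missing elements flushes one window
lemma B_fill (w : Int) (pairs : List (Int × Int)) :
    ∀ (s : List (List Int × List Int)) (cs cd : List Int),
      pairs ≠ [] → (cs.length : Int) + pairs.length = w →
      pairs.foldl (pvStepB w) (s, cs, cd) =
        (s ++ [(cs ++ pairs.map Prod.fst, cd ++ pairs.map Prod.snd)], [], []) := by
  induction pairs with
  | nil => intro _ _ _ hne _; exact absurd rfl hne
  | cons p rest ih =>
    intro s cs cd _ hlen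
    simp only [List.foldl_cons, pvStepB]
    rcases rest with _ | ⟨q, rest'⟩
    · have h : (PySem.List.len (cs ++ [p.1])) = w := by
        simp [PySem.List.len_eq]; simp at hlen; omega
      simp only [if_pos h, List.foldl_nil, List.map_cons, List.map_nil]
    · have h : ¬ (PySem.List.len (cs ++ [p.1])) = w := by
        simp [PySem.List.len_eq]; simp at hlen ⊢; omega
      simp only [if_neg h]
      rw [ih s (cs ++ [p.1]) (cd ++ [p.2]) (by simp) (by simp at hlen ⊢; omega)]
      simp

-- too few elements to flush: the buffers just grow
lemma B_partial (w : Int) (pairs : List (Int × Int)) :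
    ∀ (s : List (List Int × List Int)) (cs cd : List Int),
      (cs.length : Int) + pairs.length < w →
      pairs.foldl (pvStepB w) (s, cs, cd) =
        (s, cs ++ pairs.map Prod.fst, cd ++ pairs.map Prod.snd) := by
  induction pairs with
  | nil => intro s cs cd _; simp
  | cons p rest ih =>
    intro s cs cd hlen
    simp only [List.foldl_cons, pvStepB]
    have h : ¬ (PySem.List.len (cs ++ [p.1])) = w := by
      simp [PySem.List.len_eq]; simp at hlen; omega
    simp only [if_neg h]
    rw [ih s (cs ++ [p.1]) (cd ++ [p.2]) (by simp at hlen ⊢; omega)]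
    simp

lemma B_nil (w : Int) : slice_sequence_fixed_window_alt [] [] w = [] := by
  simp [slice_sequence_fixed_window_alt]

lemma B_small (seq delta_t_seq : List Int) (w : Int)
    (hl : seq.length = delta_t_seq.length) (hs : seq ≠ [])
    (hlt : (seq.length : Int) < w) :
    slice_sequence_fixed_window_alt seq delta_t_seq w = [(seq, delta_t_seq)] := by
  unfold slice_sequence_fixed_window_alt
  rw [B_partial w _ [] [] [] (by simp [List.length_zip, hl]; omega)]
  simp only [List.nil_append]
  rw [List.map_fst_zip (by omega), List.map_snd_zip (by omega)]
  simp [hs]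

lemma B_cons (seq delta_t_seq : List Int) (w : Int) (hw : 0 < w)
    (hl : seq.length = delta_t_seq.length) (hge : w ≤ (seq.length : Int)) :
    slice_sequence_fixed_window_alt seq delta_t_seq w =
      (seq.take w.toNat, delta_t_seq.take w.toNat) ::
        slice_sequence_fixed_window_alt (seq.drop w.toNat) (delta_t_seq.drop w.toNat) w := by
  unfold slice_sequence_fixed_window_alt
  have hsplit : seq.zip delta_t_seq =
      (seq.take w.toNat).zip (delta_t_seq.take w.toNat) ++
        (seq.drop w.toNat).zip (delta_t_seq.drop w.toNat) := by
    rw [← List.zip_append (l₁ := seq.take w.toNat) (r₁ := seq.drop w.toNat)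
      (l₂ := delta_t_seq.take w.toNat) (r₂ := delta_t_seq.drop w.toNat) (by simp [hl])]
    simp
  rw [hsplit, List.foldl_append]
  rw [B_fill w _ [] [] []
      (by intro h; have := congrArg List.length h
          simp only [List.length_zip, List.length_take, List.length_nil] at this; omega)
      (by simp only [List.length_zip, List.length_take, List.length_nil]; push_cast; omega)]
  rw [List.map_fst_zip (by simp; omega), List.map_snd_zip (by simp; omega)]
  simp only [List.nil_append]
  have := B_acc_out w ((seq.drop w.toNat).zip (delta_t_seq.drop w.toNat))
      [(seq.take w.toNat, delta_t_seq.take w.toNat)] [] [] []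
  simp only [List.append_nil] at this
  rw [this]
  set st := ((seq.drop w.toNat).zip (delta_t_seq.drop w.toNat)).foldl (pvStepB w) ([], [], [])
  by_cases h : st.2.1 ≠ []
  · simp [h]
  · simp [h]

lemma AB_main (w : Int) (hw : 0 < w) :
    ∀ (N : Nat) (seq delta_t_seq : List Int), seq.length ≤ N →
      seq.length = delta_t_seq.length →
      slice_sequence_fixed_window seq delta_t_seq w =
        slice_sequence_fixed_window_alt seq delta_t_seq w := by
  intro N
  induction N with
  | zero =>
    intro seq dts hN hl
    have hs : seq = [] := List.eq_nil_of_length_eq_zero (by omega)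
    have hd : dts = [] := List.eq_nil_of_length_eq_zero (by omega)
    subst hs; subst hd
    rw [A_nil, B_nil]
  | succ n ih =>
    intro seq dts hN hl
    rcases eq_or_ne seq [] with hs | hs
    · have hd : dts = [] := List.eq_nil_of_length_eq_zero (by subst hs; simp at hl; omega)
      subst hs; subst hd
      rw [A_nil, B_nil]
    · rcases lt_or_ge ((seq.length : Int)) w with hlt | hge
      · rw [A_cons _ _ _ hw hs, B_small _ _ _ hl hs hlt]
        have h1 : seq.take w.toNat = seq := List.take_of_length_le (by omega)
        have h2 : dts.take w.toNat = dts := List.take_of_length_le (by omega)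
        have h3 : seq.drop w.toNat = [] := List.drop_eq_nil_of_le (by omega)
        have h4 : dts.drop w.toNat = [] := List.drop_eq_nil_of_le (by omega)
        rw [h1, h2, h3, h4, A_nil]
      · rw [A_cons _ _ _ hw hs, B_cons _ _ _ hw hl hge]
        congr 1
        apply ih
        · have : seq ≠ [] := hs
          have : 0 < seq.length := List.length_pos_iff.mpr hs
          simp; omega
        · simp; omega

-- ===== VERDICT (by name: the statement is the Claim_ definition above) =====
theorem slice_sequence_fixed_window_spec : Claim_equal_slice_sequence_fixed_window := by
  intro seq dts w _ hpre
  obtain ⟨hl, hw⟩ := hpre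
  unfold Spec_slice_sequence_fixed_window
  exact AB_main w (by omega) seq.length seq dts le_rfl hl
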